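-- pv_equiv track=rewrite | github.com/fbuetler/adventofcode | 2024/15/solve.py | blow_up
-- ===== SOURCE A (Python) =====
-- def blow_up(grid, rx, ry):
--     new_grid = list()
--     for i, l in enumerate(grid):
--         g = list()
--         for j, c in enumerate(l):
--             if c == "O":
--                 g += ["[", "]"]
--             else:
--                 g += [c, c]
--         new_grid.append(g)
--     return new_grid, rx, 2*ry
-- ===== SOURCE B (Python) =====
-- def blow_up(grid, rx, ry):
--     # Build the doubled row by interleaving two mapped copies of the row:
--     # a "left halves" copy (O -> '[') and a "right halves" copy (O -> ']').
--     new_grid = []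
--     for l in grid:
--         lefts = ["[" if c == "O" else c for c in l]
--         rights = ["]" if c == "O" else c for c in l]
--         new_grid.append([x for pair in zip(lefts, rights) for x in pair])
--     return new_grid, rx, 2 * ry
-- ===== Notes on version B (the rewrite author's own statement) =====
-- stated objective: alternative
-- what changed: Instead of one pass appending a two-element chunk per cell with an if/else, B maps the row twice (a left-half copy with O->'[' and a right-half copy with O->']') and interleaves the two copies elementwise via zip.
import Mathlib
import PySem

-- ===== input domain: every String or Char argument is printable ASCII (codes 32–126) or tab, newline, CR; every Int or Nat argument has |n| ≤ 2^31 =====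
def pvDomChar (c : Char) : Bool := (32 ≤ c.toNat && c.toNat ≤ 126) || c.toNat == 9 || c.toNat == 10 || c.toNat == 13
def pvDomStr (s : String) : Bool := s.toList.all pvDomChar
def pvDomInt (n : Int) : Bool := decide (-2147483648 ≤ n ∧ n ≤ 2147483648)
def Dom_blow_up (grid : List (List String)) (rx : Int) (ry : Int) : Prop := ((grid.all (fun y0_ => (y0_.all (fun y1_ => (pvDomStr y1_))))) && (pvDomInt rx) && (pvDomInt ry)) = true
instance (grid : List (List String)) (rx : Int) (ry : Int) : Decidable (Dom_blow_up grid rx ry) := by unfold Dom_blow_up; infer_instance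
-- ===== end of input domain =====

-- B builds each doubled row by interleaving two mapped copies of the row (left/right halves)
-- instead of A's single pass appending a two-element chunk per cell; same cost, different structure.


-- ===== PORT A =====
def blow_up (grid : List (List String)) (rx : Int) (ry : Int) : List (List String) × Int × Int :=
  ((PySem.List.enumerate grid 0).foldl
      (fun new_grid il =>
        new_grid ++ [(PySem.List.enumerate il.2 0).foldl
          (fun g jc => g ++ (if jc.2 = "O" then ["[", "]"] else [jc.2, jc.2])) []])
      [],
    rx, 2 * ry)

-- ===== PORT B =====
-- [x for pair in zip(lefts, rights) for x in pair]
def pvInterleave : List String → List String → List String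
  | x :: xs, y :: ys => x :: y :: pvInterleave xs ys
  | _, _ => []

def blow_up_alt (grid : List (List String)) (rx : Int) (ry : Int) : List (List String) × Int × Int :=
  (grid.map (fun l =>
      pvInterleave (l.map (fun c => if c = "O" then "[" else c))
                   (l.map (fun c => if c = "O" then "]" else c))),
    rx, 2 * ry)

-- ===== PRECONDITION & SPEC =====
def Spec_blow_up (grid : List (List String)) (rx : Int) (ry : Int) (out : List (List String) × Int × Int) : Prop := out = blow_up_alt grid rx ry
instance (grid : List (List String)) (rx : Int) (ry : Int) (out : List (List String) × Int × Int) : Decidable (Spec_blow_up grid rx ry out) := by unfold Spec_blow_up; infer_instance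

-- ===== CLAIM (what is proved, stated in full; the proofs are below) =====
def Claim_equal_blow_up : Prop := ∀ (grid : List (List String)) (rx : Int) (ry : Int), Dom_blow_up grid rx ry → Spec_blow_up grid rx ry (blow_up grid rx ry)

-- ===== LEMMAS AND PROOFS =====
theorem flatMap_eq_interleave (l : List String) :
    l.flatMap (fun c => if c = "O" then ["[", "]"] else [c, c]) =
      pvInterleave (l.map (fun c => if c = "O" then "[" else c))
                   (l.map (fun c => if c = "O" then "]" else c)) := by
  induction l with
  | nil => rfl
  | cons c l ih =>
    simp only [List.flatMap_cons, List.map_cons, pvInterleave, ih]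
    by_cases h : c = "O" <;> simp [h]

theorem foldl_enumerate_snd {α β : Type} (l : List α) (s : Int) (f : β → α → β) (acc : β) :
    (PySem.List.enumerate l s).foldl (fun g jc => f g jc.2) acc = l.foldl f acc := by
  have := List.foldl_map (f := fun p : Int × α => p.2) (g := f)
    (l := PySem.List.enumerate l s) (init := acc)
  rw [← this, PySem.List.map_snd_enumerate]

theorem row_eq (l : List String) :
    (PySem.List.enumerate l 0).foldl
        (fun g jc => g ++ (if jc.2 = "O" then ["[", "]"] else [jc.2, jc.2])) [] =
      pvInterleave (l.map (fun c => if c = "O" then "[" else c))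
                   (l.map (fun c => if c = "O" then "]" else c)) := by
  rw [foldl_enumerate_snd (f := fun g c => g ++ (if c = "O" then ["[", "]"] else [c, c])),
    PySem.List.foldl_append_eq_flatMap, List.nil_append, flatMap_eq_interleave]

-- ===== VERDICT (by name: the statement is the Claim_ definition above) =====
theorem blow_up_spec : Claim_equal_blow_up := by
  intro grid rx ry _
  show blow_up grid rx ry = blow_up_alt grid rx ry
  unfold blow_up blow_up_alt
  refine Prod.ext ?_ rfl
  simp only
  rw [foldl_enumerate_snd
    (f := fun ng l => ng ++ [(PySem.List.enumerate l 0).foldl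
      (fun g jc => g ++ (if jc.2 = "O" then ["[", "]"] else [jc.2, jc.2])) []]),
    PySem.List.foldl_append_singleton_eq_map, List.nil_append]
  exact List.map_congr_left (fun l _ => row_eq l)
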